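-- pv_equiv track=rewrite | github.com/AlexRemstedt/aoc24 | day2/part2.py | dampener
-- ===== SOURCE A (Python) =====
-- def difference(report: list[int]) -> bool:
--     for i, j in zip(report[:-1], report[1:]):
--         diff = abs(i - j)
--         if diff < 1 or diff > 3:
--             return False
--     return True
--
-- def inorder(report: list[int]) -> bool:
--     return report[::-1] == sorted(report) or report == sorted(report)
--
-- def dampener(report: list[int]) -> bool:
--     for i in range(len(report)):
--         temp_rep = report[:i] + report[i + 1:]
--         if not inorder(temp_rep):
--             continue
--         if not difference(temp_rep):
--             continue
--         return True
--     return False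
-- ===== SOURCE B (Python) =====
-- def _first_bad(r, lo, hi):
--     # index of the first adjacent pair whose difference is outside [lo, hi], else None
--     for k in range(len(r) - 1):
--         d = r[k + 1] - r[k]
--         if d < lo or d > hi:
--             return k
--     return None
--
-- def _fixable(r, lo, hi):
--     # can r be made valid (all adjacent diffs in [lo, hi]) by removing one element?
--     i = _first_bad(r, lo, hi)
--     if i is None:
--         return True  # r is valid; dropping the last element keeps it valid
--     return _first_bad(r[:i] + r[i + 1:], lo, hi) is None or \
--            _first_bad(r[:i + 1] + r[i + 2:], lo, hi) is None
--
-- def dampener(report: list[int]) -> bool: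
--     return bool(report) and (_fixable(report, 1, 3) or _fixable(report, -3, -1))
-- ===== Notes on version B (the rewrite author's own statement) =====
-- stated objective: faster
-- what changed: Instead of trying every removal index and re-checking each shortened list with sorts (inorder) plus a pairwise-difference pass, B makes one linear scan per direction to find the first out-of-band adjacent pair and only re-scans the two lists obtained by removing one of that pair's endpoints.
import Mathlib
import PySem

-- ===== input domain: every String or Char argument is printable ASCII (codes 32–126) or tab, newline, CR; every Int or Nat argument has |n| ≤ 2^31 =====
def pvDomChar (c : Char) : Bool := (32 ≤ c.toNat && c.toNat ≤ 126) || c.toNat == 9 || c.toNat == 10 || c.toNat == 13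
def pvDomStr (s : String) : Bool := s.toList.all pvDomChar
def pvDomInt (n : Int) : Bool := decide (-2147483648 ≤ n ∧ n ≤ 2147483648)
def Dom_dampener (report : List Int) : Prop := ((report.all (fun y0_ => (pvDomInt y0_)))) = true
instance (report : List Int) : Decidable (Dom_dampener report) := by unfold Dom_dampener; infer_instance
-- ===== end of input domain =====

-- B replaces A's try-every-removal-and-sort check by a single linear scan that
-- locates the first bad adjacent pair and re-checks only the two local removals (objective: faster).

-- ===== PORT A =====
def differenceGo : List (Int × Int) → Bool
  | [] => true
  | (i, j) :: t => if |i - j| < 1 ∨ |i - j| > 3 then false else differenceGo t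

def difference (report : List Int) : Bool :=
  differenceGo ((PySem.List.slice report none (some (-1))).zip (PySem.List.slice report (some 1) none))

def inorder (report : List Int) : Bool :=
  (PySem.List.slice? report none none (-1) == some (PySem.List.sorted report (fun x => x) false))
  || (report == PySem.List.sorted report (fun x => x) false)

def dampenerGo (report : List Int) : List Int → Bool
  | [] => false
  | i :: rest =>
    let temp_rep := PySem.List.slice report none (some i) ++ PySem.List.slice report (some (i + 1)) none
    if !inorder temp_rep then dampenerGo report rest
    else if !difference temp_rep then dampenerGo report rest
    else true

def dampener (report : List Int) : Bool :=
  dampenerGo report (PySem.List.pyRange 0 (report.length : Int) 1)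

-- ===== PORT B =====
def firstBad (lo hi : Int) : List Int → Option Nat
  | [] => none
  | [_] => none
  | a :: b :: t => if b - a < lo ∨ b - a > hi then some 0 else (firstBad lo hi (b :: t)).map (· + 1)

def fixable (r : List Int) (lo hi : Int) : Bool :=
  match firstBad lo hi r with
  | none => true
  | some i =>
    (firstBad lo hi (r.take i ++ r.drop (i + 1)) == none)
    || (firstBad lo hi (r.take (i + 1) ++ r.drop (i + 2)) == none)

def dampener_alt (report : List Int) : Bool :=
  !report.isEmpty && (fixable report 1 3 || fixable report (-3) (-1))

-- ===== PRECONDITION & SPEC =====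
def Spec_dampener (report : List Int) (out : Bool) : Prop := out = dampener_alt report
instance (report : List Int) (out : Bool) : Decidable (Spec_dampener report out) := by unfold Spec_dampener; infer_instance

-- ===== CLAIM (what is proved, stated in full; the proofs are below) =====
def Claim_equal_dampener : Prop := ∀ (report : List Int), Dom_dampener report → Spec_dampener report (dampener report)

-- ===== LEMMAS AND PROOFS =====

-- the in-band predicate: the adjacent difference b - a lies in [lo, hi]
def Pb (lo hi a b : Int) : Prop := lo ≤ b - a ∧ b - a ≤ hi

lemma firstBad_eq_none_iff (lo hi : Int) (r : List Int) :
    firstBad lo hi r = none ↔ List.IsChain (Pb lo hi) r := by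
  induction r with
  | nil => simp [firstBad]
  | cons a t ih =>
    cases t with
    | nil => simp [firstBad]
    | cons b t2 =>
      rw [List.isChain_cons_cons, ← ih]
      simp only [firstBad]
      split_ifs with h
      · simp [Pb]; omega
      · simp [Pb]; omega

lemma firstBad_eq_some (lo hi : Int) (r : List Int) (i : Nat)
    (h : firstBad lo hi r = some i) :
    ∃ x y, r[i]? = some x ∧ r[i + 1]? = some y ∧ ¬ Pb lo hi x y := by
  induction r generalizing i with
  | nil => simp [firstBad] at h
  | cons a t ih =>
    cases t with
    | nil => simp [firstBad] at h
    | cons b t2 =>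
      simp only [firstBad] at h
      split_ifs at h with hb
      · cases h
        exact ⟨a, b, rfl, rfl, by simp [Pb]; omega⟩
      · simp only [Option.map_eq_some_iff] at h
        obtain ⟨i', hi', rfl⟩ := h
        obtain ⟨x, y, hx, hy, hxy⟩ := ih i' hi'
        exact ⟨x, y, by simpa using hx, by simpa using hy, hxy⟩

lemma isChain_eraseIdx_ne (lo hi : Int) (r : List Int) (i j : Nat) (x y : Int)
    (hx : r[i]? = some x) (hy : r[i + 1]? = some y) (hbad : ¬ Pb lo hi x y)
    (hji : j ≠ i) (hji1 : j ≠ i + 1) :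
    ¬ List.IsChain (Pb lo hi) (r.eraseIdx j) := by
  intro hc
  rw [List.getElem?_eq_some_iff] at hx hy
  obtain ⟨hi1, rfl⟩ := hx
  obtain ⟨hi2, rfl⟩ := hy
  rw [List.isChain_iff_getElem] at hc
  rcases Nat.lt_or_ge j i with hj | hj
  · -- j < i : the pair sits at positions i-1, i of the erased list
    have hlen : (r.eraseIdx j).length = r.length - 1 := by
      rw [List.length_eraseIdx_of_lt (by omega)]
    have h1 : i - 1 + 1 < (r.eraseIdx j).length := by omega
    have := hc (i - 1) h1
    rw [List.getElem_eraseIdx_of_ge (by omega) (by omega),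
        List.getElem_eraseIdx_of_ge (by omega) (by omega)] at this
    have e1 : i - 1 + 1 = i := by omega
    simp only [e1] at this
    exact hbad this
  · -- i + 1 < j : the pair stays at positions i, i+1
    have hj2 : i + 1 < j := by omega
    have hjlen : j < r.length := by
      by_contra hge
      rw [List.eraseIdx_of_length_le (by omega)] at hc
      exact hbad (hc i hi2)
    have hlen : (r.eraseIdx j).length = r.length - 1 := by
      rw [List.length_eraseIdx_of_lt hjlen]
    have h1 : i + 1 < (r.eraseIdx j).length := by omega
    have := hc i h1
    rw [List.getElem_eraseIdx_of_lt (by omega) (by omega),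
        List.getElem_eraseIdx_of_lt (by omega) (by omega)] at this
    exact hbad this

lemma isChain_dropLast {P : Int → Int → Prop} {r : List Int}
    (h : List.IsChain P r) : List.IsChain P r.dropLast := by
  rw [List.isChain_iff_getElem] at h ⊢
  intro k hk
  have hk' : k + 1 < r.length := by
    simp [List.length_dropLast] at hk; omega
  have := h k hk'
  rwa [List.getElem_dropLast, List.getElem_dropLast]

lemma fixable_iff (r : List Int) (lo hi : Int) (hr : r ≠ []) :
    fixable r lo hi = true ↔ ∃ j < r.length, List.IsChain (Pb lo hi) (r.eraseIdx j) := by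
  have hn : 0 < r.length := List.length_pos_iff.mpr hr
  unfold fixable
  cases hfb : firstBad lo hi r with
  | none =>
    simp only [true_iff]
    refine ⟨r.length - 1, by omega, ?_⟩
    rw [List.eraseIdx_length_sub_one]
    exact isChain_dropLast ((firstBad_eq_none_iff lo hi r).mp hfb)
  | some i =>
    obtain ⟨x, y, hx, hy, hbad⟩ := firstBad_eq_some lo hi r i hfb
    have hi2 : i + 1 < r.length := by
      rw [List.getElem?_eq_some_iff] at hy; exact hy.1
    simp only [Bool.or_eq_true, beq_iff_eq, firstBad_eq_none_iff]
    rw [← List.eraseIdx_eq_take_drop_succ r i, ← List.eraseIdx_eq_take_drop_succ r (i + 1)]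
    constructor
    · rintro (h | h)
      · exact ⟨i, by omega, h⟩
      · exact ⟨i + 1, by omega, h⟩
    · rintro ⟨j, hjlen, hc⟩
      by_cases hji : j = i
      · exact Or.inl (hji ▸ hc)
      by_cases hji1 : j = i + 1
      · exact Or.inr (hji1 ▸ hc)
      exact absurd hc (isChain_eraseIdx_ne lo hi r i j x y hx hy hbad hji hji1)

-- ===== A-side characterisations =====

lemma differenceGo_iff (r : List Int) :
    differenceGo (r.dropLast.zip r.tail) = true ↔
      List.IsChain (fun a b : Int => 1 ≤ |a - b| ∧ |a - b| ≤ 3) r := by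
  induction r with
  | nil => simp [differenceGo]
  | cons a t ih =>
    cases t with
    | nil => simp [differenceGo]
    | cons b t2 =>
      have hz : (a :: b :: t2).dropLast.zip (a :: b :: t2).tail
          = (a, b) :: ((b :: t2).dropLast.zip (b :: t2).tail) := by
        cases t2 <;> simp [List.dropLast]
      rw [hz, List.isChain_cons_cons, ← ih]
      simp only [differenceGo]
      split_ifs with h
      · simp; omega
      · simp; omega

lemma difference_iff (r : List Int) :
    difference r = true ↔ List.IsChain (fun a b : Int => 1 ≤ |a - b| ∧ |a - b| ≤ 3) r := by
  rw [difference, PySem.List.slice_to_neg_one, PySem.List.slice_from_one]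
  exact differenceGo_iff r

lemma isChain_le_iff_sorted_eq (r : List Int) :
    r = PySem.List.sorted r (fun x => x) false ↔ List.IsChain (fun a b : Int => a ≤ b) r := by
  constructor
  · intro h
    have hp := PySem.List.sorted_pairwise (xs := r) (key := fun x => x)
    rw [← h] at hp
    exact hp.isChain
  · intro h
    exact (PySem.List.sorted_eq_self_of_pairwise r (fun x => x) h.pairwise).symm

lemma isChain_ge_iff_sorted_eq (r : List Int) :
    r.reverse = PySem.List.sorted r (fun x => x) false ↔
      List.IsChain (fun a b : Int => b ≤ a) r := by
  constructor
  · intro h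
    have hp := PySem.List.sorted_pairwise (xs := r) (key := fun x => x)
    rw [← h, List.pairwise_reverse] at hp
    exact hp.isChain
  · intro h
    have hp : r.reverse.Pairwise (fun a b : Int => a ≤ b) :=
      (List.isChain_reverse.mpr h).pairwise
    exact (PySem.List.sorted_id_eq_of_perm_of_pairwise r r.reverse r.reverse_perm hp).symm

lemma inorder_iff (r : List Int) :
    inorder r = true ↔
      List.IsChain (fun a b : Int => b ≤ a) r ∨ List.IsChain (fun a b : Int => a ≤ b) r := by
  rw [inorder]
  simp only [Bool.or_eq_true, beq_iff_eq, PySem.List.slice?_none_none_neg_one,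
    Option.some.injEq]
  rw [isChain_ge_iff_sorted_eq, isChain_le_iff_sorted_eq]

lemma isChain_and_iff {A B : Int → Int → Prop} {r : List Int} :
    List.IsChain A r ∧ List.IsChain B r ↔ List.IsChain (fun a b => A a b ∧ B a b) r := by
  simp only [List.isChain_iff_getElem]
  constructor
  · rintro ⟨h1, h2⟩ k hk; exact ⟨h1 k hk, h2 k hk⟩
  · intro h; exact ⟨fun k hk => (h k hk).1, fun k hk => (h k hk).2⟩

lemma isChain_congr {A B : Int → Int → Prop} {r : List Int}
    (h : ∀ a b, A a b ↔ B a b) : List.IsChain A r ↔ List.IsChain B r :=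
  ⟨fun hc => hc.imp (fun _ _ ha => (h _ _).mp ha), fun hc => hc.imp (fun _ _ hb => (h _ _).mpr hb)⟩

lemma good_iff (r : List Int) :
    (inorder r && difference r) = true ↔
      List.IsChain (Pb 1 3) r ∨ List.IsChain (Pb (-3) (-1)) r := by
  rw [Bool.and_eq_true, inorder_iff, difference_iff]
  rw [or_and_right]
  rw [isChain_and_iff, isChain_and_iff]
  rw [isChain_congr (A := fun a b : Int => b ≤ a ∧ 1 ≤ |a - b| ∧ |a - b| ≤ 3) (B := Pb (-3) (-1))
      (by
        intro a b
        unfold Pb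
        rcases le_total a b with h | h
        · simp only [abs_of_nonpos (show a - b ≤ 0 by omega)]; omega
        · simp only [abs_of_nonneg (show (0:Int) ≤ a - b by omega)]; omega),
    isChain_congr (A := fun a b : Int => a ≤ b ∧ 1 ≤ |a - b| ∧ |a - b| ≤ 3) (B := Pb 1 3)
      (by
        intro a b
        unfold Pb
        rcases le_total a b with h | h
        · simp only [abs_of_nonpos (show a - b ≤ 0 by omega)]; omega
        · simp only [abs_of_nonneg (show (0:Int) ≤ a - b by omega)]; omega)]
  exact Or.comm

lemma dampenerGo_iff (report : List Int) (l : List Int) :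
    dampenerGo report l = true ↔
      ∃ i ∈ l,
        (inorder (PySem.List.slice report none (some i)
            ++ PySem.List.slice report (some (i + 1)) none)
          && difference (PySem.List.slice report none (some i)
            ++ PySem.List.slice report (some (i + 1)) none)) = true := by
  induction l with
  | nil => simp [dampenerGo]
  | cons i rest ih =>
    simp only [dampenerGo, List.mem_cons, exists_eq_or_imp]
    split_ifs with h1 h2
    · rw [ih]
      simp only [Bool.not_eq_true'] at h1
      simp [h1]
    · rw [ih]
      simp only [Bool.not_eq_true'] at h2
      simp [h2]
    · simp only [Bool.not_eq_true', Bool.not_eq_false] at h1 h2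
      simp [h1, h2]

lemma temp_eq (report : List Int) (i : Int) (h0 : 0 ≤ i) :
    PySem.List.slice report none (some i) ++ PySem.List.slice report (some (i + 1)) none
      = report.eraseIdx i.toNat := by
  rw [PySem.List.slice_to report h0, PySem.List.slice_from report (by omega)]
  have : (i + 1).toNat = i.toNat + 1 := by omega
  rw [this, List.eraseIdx_eq_take_drop_succ]

lemma dampener_iff (r : List Int) :
    dampener r = true ↔
      ∃ j < r.length,
        (List.IsChain (Pb 1 3) (r.eraseIdx j) ∨ List.IsChain (Pb (-3) (-1)) (r.eraseIdx j)) := by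
  rw [dampener, dampenerGo_iff]
  constructor
  · rintro ⟨i, hmem, hgood⟩
    rw [PySem.List.mem_pyRange_one] at hmem
    rw [temp_eq r i hmem.1] at hgood
    exact ⟨i.toNat, by omega, (good_iff _).mp hgood⟩
  · rintro ⟨j, hj, hgood⟩
    refine ⟨(j : Int), PySem.List.mem_pyRange_one.mpr ⟨by omega, by omega⟩, ?_⟩
    rw [temp_eq r j (by omega)]
    simp only [Int.toNat_natCast]
    exact (good_iff _).mpr hgood

-- ===== VERDICT (by name: the statement is the Claim_ definition above) =====
theorem dampener_spec : Claim_equal_dampener := by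
  intro report _
  unfold Spec_dampener
  by_cases hr : report = []
  · subst hr; rfl
  · rw [Bool.eq_iff_iff, dampener_iff]
    rw [dampener_alt, Bool.and_eq_true, Bool.or_eq_true,
      fixable_iff report 1 3 hr, fixable_iff report (-3) (-1) hr]
    constructor
    · rintro ⟨j, hj, hc | hc⟩
      · exact ⟨by simp [hr], Or.inl ⟨j, hj, hc⟩⟩
      · exact ⟨by simp [hr], Or.inr ⟨j, hj, hc⟩⟩
    · rintro ⟨-, ⟨j, hj, hc⟩ | ⟨j, hj, hc⟩⟩
      · exact ⟨j, hj, Or.inl hc⟩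
      · exact ⟨j, hj, Or.inr hc⟩
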